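-- pv_equiv track=rewrite | github.com/Selinayujia/Data-Structure | HW3/yz4184_hw3_q4.py | list_min
-- ===== SOURCE A (Python) =====
-- def list_min(lst, low, high):
--     if low==high:
--         return lst[low]
--     else:
--         if lst[low]<lst[low+1]:
--             temp=lst[low+1]
--             lst[low+1]=lst[low]
--             lst[low]=temp
--             return list_min(lst,low+1,high)
--         else:
--             return list_min(lst,low+1,high)
-- ===== SOURCE B (Python) =====
-- def list_min(lst, low, high):
--     # Returns the minimum of lst[low..high] directly (no mutation of lst,
--     # unlike A which bubbles the minimum forward with swaps).
--     return min(lst[low:high+1])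
-- ===== Notes on version B (the rewrite author's own statement) =====
-- stated objective: simpler
-- what changed: Replaces the recursive bubble-the-minimum-forward pass (which mutates lst by conditional swaps and finally reads lst[high]) with a direct min over the slice lst[low:high+1]; B does not mutate lst.
-- outside the precondition, e.g. on list_min([1, 2, 3], -1, -1): A returns 3, B raises ValueError
import Mathlib
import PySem

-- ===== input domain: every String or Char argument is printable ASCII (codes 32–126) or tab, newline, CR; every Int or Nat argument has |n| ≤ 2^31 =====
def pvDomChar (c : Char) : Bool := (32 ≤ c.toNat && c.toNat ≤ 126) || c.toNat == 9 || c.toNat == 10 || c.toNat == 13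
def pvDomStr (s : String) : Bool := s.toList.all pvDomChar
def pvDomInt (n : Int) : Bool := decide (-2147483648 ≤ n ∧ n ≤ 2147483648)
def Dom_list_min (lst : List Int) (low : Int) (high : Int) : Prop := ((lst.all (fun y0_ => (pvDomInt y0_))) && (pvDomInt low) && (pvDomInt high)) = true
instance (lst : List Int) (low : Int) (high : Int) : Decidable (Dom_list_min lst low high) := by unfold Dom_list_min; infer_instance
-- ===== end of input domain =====

-- B replaces A's recursive swap-and-carry pass with a direct min over the slice lst[low:high+1]
-- (simpler; return-value equivalence only: A mutates lst in place, B does not).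

-- ===== PORT A =====
-- literal transliteration of A; the `(high - low).toNat = 0` guard only makes the
-- recursion total on the low > high inputs where Python raises IndexError (outside Pre_)
def list_min (lst : List Int) (low : Int) (high : Int) : Int :=
  if low = high then PySem.List.pyGetD lst low 0
  else if h : (high - low).toNat = 0 then 0  -- Python: IndexError (low > high); excluded by Pre_
  else
    let a := PySem.List.pyGetD lst low 0
    let b := PySem.List.pyGetD lst (low + 1) 0
    if a < b then
      -- temp = lst[low+1]; lst[low+1] = lst[low]; lst[low] = temp
      let lst' := PySem.List.pySetD (PySem.List.pySetD lst (low + 1) a) low b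
      list_min lst' (low + 1) high
    else
      list_min lst (low + 1) high
termination_by (high - low).toNat
decreasing_by all_goals omega

-- ===== PORT B =====
-- min(lst[low:high+1])
def list_min_alt (lst : List Int) (low : Int) (high : Int) : Int :=
  (PySem.List.min? (PySem.List.slice lst (some low) (some (high + 1))) (fun x => x)).getD 0

-- ===== PRECONDITION & SPEC =====
-- Pre_ excludes low > high and out-of-range indices, where A raises IndexError, and negative
-- (wraparound) indices, where A returns a wrapped value but B's slice raises ValueError.
def Pre_list_min (lst : List Int) (low : Int) (high : Int) : Prop :=
  0 ≤ low ∧ low ≤ high ∧ high < lst.length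

instance (lst : List Int) (low : Int) (high : Int) : Decidable (Pre_list_min lst low high) := by
  unfold Pre_list_min; infer_instance

def pvWitness_list_min : List Int × Int × Int := ([3, 1, 2], 0, 2)

def Spec_list_min (lst : List Int) (low : Int) (high : Int) (out : Int) : Prop := out = list_min_alt lst low high
instance (lst : List Int) (low : Int) (high : Int) (out : Int) : Decidable (Spec_list_min lst low high out) := by unfold Spec_list_min; infer_instance

-- ===== CLAIM (what is proved, stated in full; the proofs are below) =====
def Claim_equal_list_min : Prop := ∀ (lst : List Int) (low : Int) (high : Int), Dom_list_min lst low high → Pre_list_min lst low high → Spec_list_min lst low high (list_min lst low high)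

-- ===== LEMMAS AND PROOFS =====

-- minimum of lst[l..l+n] (with default 0 out of range), recursing on the head
def segMin (lst : List Int) (l : ℕ) : ℕ → Int
  | 0 => lst.getD l 0
  | n + 1 => min (lst.getD l 0) (segMin lst (l + 1) n)

theorem segMin_congr (lst lst₂ : List Int) :
    ∀ (n l : ℕ), (∀ k, k ≤ n → lst₂.getD (l + k) 0 = lst.getD (l + k) 0) →
      segMin lst₂ l n = segMin lst l n := by
  intro n
  induction n with
  | zero =>
    intro l h
    have h0 := h 0 (le_refl _)
    rw [Nat.add_zero] at h0
    simpa [segMin] using h0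
  | succ m ih =>
    intro l h
    have h0 := h 0 (by omega)
    rw [Nat.add_zero] at h0
    simp only [segMin]
    rw [h0, ih (l + 1) (fun k hk => by
      have hx := h (k + 1) (by omega)
      rw [show l + 1 + k = l + (k + 1) from by omega]
      exact hx)]

-- after one step of A, the list carries min a b at position l and is untouched beyond
theorem segMin_step (lst lst₂ : List Int) (l : ℕ) (a b : Int)
    (h0 : lst₂.getD l 0 = min a b)
    (hrest : ∀ k, lst₂.getD (l + 1 + k) 0 = lst.getD (l + 1 + k) 0)
    (hb : lst.getD l 0 = b) :
    ∀ n, segMin lst₂ l n = min a (segMin lst l n) := by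
  intro n
  cases n with
  | zero => simp only [segMin]; rw [h0, hb]
  | succ m =>
    simp only [segMin]
    rw [h0, hb, segMin_congr lst lst₂ m (l + 1) (fun k _ => hrest k), min_assoc]

theorem getD_set_above (lst : List Int) (i : ℕ) (v : Int) (j : ℕ) (hij : i < j) :
    (lst.set i v).getD j 0 = lst.getD j 0 := by
  simp only [List.getD, List.getElem?_set]
  rw [if_neg (by omega)]

theorem getD_set_self_lt (lst : List Int) (i : ℕ) (v : Int) (h : i < lst.length) :
    (lst.set i v).getD i 0 = v := by
  have hs : (lst.set i v)[i]? = some v := by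
    rw [List.getElem?_set]
    simp [h]
  simp [List.getD, hs]

-- A computes segMin on in-bounds segments
theorem list_min_eq_segMin : ∀ (n : ℕ) (lst : List Int) (l : ℕ), l + n < lst.length →
    list_min lst (l : Int) ((l : ℕ) + (n : ℕ) : Int) = segMin lst l n := by
  intro n
  induction n with
  | zero => intro lst l _; rw [list_min]; simp [segMin]
  | succ m ih =>
    intro lst l hlen
    rw [list_min]
    rw [if_neg (show ¬ ((l : Int) = (l : Int) + ((m + 1 : ℕ) : Int)) by push_cast; omega)]
    rw [dif_neg (show ¬ (((l : Int) + ((m + 1 : ℕ) : Int) - (l : Int)).toNat = 0) by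
      push_cast; omega)]
    simp only []
    have ha : PySem.List.pyGetD lst (l : Int) 0 = lst.getD l 0 :=
      PySem.List.pyGetD_natCast lst l 0
    have hb : PySem.List.pyGetD lst ((l : Int) + 1) 0 = lst.getD (l + 1) 0 := by
      rw [show ((l : Int) + 1) = ((l + 1 : ℕ) : Int) from by push_cast; ring]
      exact PySem.List.pyGetD_natCast lst (l + 1) 0
    rw [ha, hb]
    set a := lst.getD l 0 with hadef
    set b := lst.getD (l + 1) 0 with hbdef
    have hcast1 : ((l : Int) + 1) = ((l + 1 : ℕ) : Int) := by push_cast; ring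
    have hcast2 : ((l : Int) + ((m + 1 : ℕ) : Int)) = ((l + 1 : ℕ) : Int) + ((m : ℕ) : Int) := by
      push_cast; ring
    by_cases hab : a < b
    · rw [if_pos hab]
      rw [show PySem.List.pySetD (PySem.List.pySetD lst ((l : Int) + 1) a) (l : Int) b
            = (lst.set (l + 1) a).set l b from by
        rw [hcast1, PySem.List.pySetD_natCast, PySem.List.pySetD_natCast]]
      rw [hcast1, hcast2, ih _ _ (by simp only [List.length_set]; omega)]
      rw [segMin_step lst ((lst.set (l + 1) a).set l b) (l + 1) a b ?h0 ?hrest rfl m]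
      · simp only [segMin]
        rw [← hadef]
      case h0 =>
        rw [getD_set_above _ l b (l + 1) (by omega),
          getD_set_self_lt _ _ _ (by omega : l + 1 < lst.length)]
        exact (min_eq_left hab.le).symm
      case hrest =>
        intro k
        rw [getD_set_above _ l b (l + 1 + 1 + k) (by omega),
          getD_set_above _ (l + 1) a (l + 1 + 1 + k) (by omega)]
    · rw [if_neg hab]
      rw [hcast1, hcast2, ih _ _ (by omega)]
      have hstep := segMin_step lst lst (l + 1) a b
        (by rw [← hbdef]; exact (min_eq_right (not_lt.mp hab)).symm)
        (fun k => rfl) rfl m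
      simp only [segMin]
      rw [← hadef]
      exact hstep

-- foldl min over a segment equals segMin
theorem foldl_min_seg (lst : List Int) :
    ∀ (n l : ℕ) (x : Int), l + n + 1 ≤ lst.length →
      ((lst.drop l).take (n + 1)).foldl min x = min x (segMin lst l n) := by
  intro n
  induction n with
  | zero =>
    intro l x h
    have hl : l < lst.length := by omega
    rw [List.drop_eq_getElem_cons hl, List.take_succ_cons, List.take_zero, List.foldl_cons,
      List.foldl_nil]
    simp [segMin, List.getD, List.getElem?_eq_getElem hl]
  | succ m ih =>
    intro l x h
    have hl : l < lst.length := by omega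
    rw [List.drop_eq_getElem_cons hl]
    rw [List.take_succ_cons, List.foldl_cons]
    rw [ih (l + 1) (min x lst[l]) (by omega)]
    rw [min_assoc]
    have : lst[l] = lst.getD l 0 := by
      simp [List.getD, List.getElem?_eq_getElem hl]
    rw [this, segMin]

theorem list_min_alt_eq_segMin (lst : List Int) (n l : ℕ) (h : l + n < lst.length) :
    list_min_alt lst (l : Int) ((l : ℕ) + (n : ℕ) : Int) = segMin lst l n := by
  unfold list_min_alt
  have hcast : ((l : Int) + (n : Int)) + 1 = ((l + n + 1 : ℕ) : Int) := by push_cast; ring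
  rw [hcast]
  rw [show ((l + n + 1 : ℕ) : Int) = ((l : ℕ) : Int) + ((n + 1 : ℕ) : Int) by push_cast; ring]
  rw [PySem.List.slice_natCast_add]
  have hl : l < lst.length := by omega
  rw [List.drop_eq_getElem_cons hl, List.take_succ_cons]
  rw [PySem.List.min?_id_cons]
  simp only [Option.getD_some]
  have hgl : lst[l] = lst.getD l 0 := by
    simp [List.getD, List.getElem?_eq_getElem hl]
  cases n with
  | zero => simp [segMin, hgl]
  | succ m =>
    rw [foldl_min_seg lst m (l + 1) _ (by omega)]
    rw [hgl, segMin]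

-- ===== VERDICT (by name: the statement is the Claim_ definition above) =====
theorem list_min_spec : Claim_equal_list_min := by
  unfold Claim_equal_list_min
  intro lst low high _ hpre
  obtain ⟨h0, hlh, hhi⟩ := hpre
  unfold Spec_list_min
  set l : ℕ := low.toNat with hl
  set n : ℕ := (high - low).toNat with hn
  have hlow : low = (l : Int) := by omega
  have hhigh : high = ((l : ℕ) : Int) + ((n : ℕ) : Int) := by omega
  have hbound : l + n < lst.length := by omega
  rw [hlow, hhigh, list_min_eq_segMin n lst l hbound, list_min_alt_eq_segMin lst n l hbound]
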